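-- pv_equiv track=rewrite | github.com/fourier0520/Cataclysm-DDA | genlua.py | is_valid_class
-- ===== SOURCE A (Python) =====
-- valid_classes = [
--     'bool',
--     'body_part',
--     'std::string',
--     'units::mass',
--     'units::volume',
--     'int',
--     'float',
--     'item',
--     'int',
--     'itype',
-- ]
--
-- def is_valid_class(str):
--     for c in valid_classes:
--         if c == str:
--             return True
--         if (c + '*') == str:
--             return True
--         if (c + '&') == str:
--             return True
--     return False
-- ===== SOURCE B (Python) =====
-- valid_classes = [
--     'bool',
--     'body_part',
--     'std::string',
--     'units::mass',
--     'units::volume',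
--     'int',
--     'float',
--     'item',
--     'int',
--     'itype',
-- ]
--
-- _valid_set = set(valid_classes)
--
-- def is_valid_class(str):
--     base = str[:-1] if str and str[-1] in ('*', '&') else str
--     return base in _valid_set
-- ===== Notes on version B (the rewrite author's own statement) =====
-- stated objective: simpler
-- what changed: B parses the input (strip one trailing '*' or '&', else keep it) and does a single set-membership lookup, instead of A's loop comparing three generated variants per class name.
import Mathlib
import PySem

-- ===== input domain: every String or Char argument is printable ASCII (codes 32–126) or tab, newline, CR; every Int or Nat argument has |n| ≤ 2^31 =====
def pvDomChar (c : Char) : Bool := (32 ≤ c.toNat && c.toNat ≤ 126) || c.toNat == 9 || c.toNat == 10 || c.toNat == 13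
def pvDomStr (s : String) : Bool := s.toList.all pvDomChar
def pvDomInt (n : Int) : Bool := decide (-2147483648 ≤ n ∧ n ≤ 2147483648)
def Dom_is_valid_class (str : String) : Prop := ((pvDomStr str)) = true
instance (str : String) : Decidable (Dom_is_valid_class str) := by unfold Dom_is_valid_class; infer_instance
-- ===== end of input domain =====

-- B replaces A's loop over three generated variants per class name by parsing the input
-- (strip one trailing '*'/'&') followed by a single set-membership test (objective: simpler).

def valid_classes : List String :=
  ["bool", "body_part", "std::string", "units::mass", "units::volume",
   "int", "float", "item", "int", "itype"]

-- ===== PORT A =====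
-- A's loop: for each class name c, test c, c+'*', c+'&' against the input; string
-- concatenation/equality ported on the List Char side (exact for Python str).
def isValidLoop (s : List Char) : List String → Bool
  | [] => false
  | c :: rest =>
    if c.toList = s then true
    else if c.toList ++ ['*'] = s then true
    else if c.toList ++ ['&'] = s then true
    else isValidLoop s rest

def is_valid_class (str : String) : Bool :=
  isValidLoop str.toList valid_classes

-- ===== PORT B =====
def validSet : PySem.Set (List Char) :=
  PySem.Set.ofList (valid_classes.map String.toList)

def is_valid_class_alt (str : String) : Bool :=
  let s := str.toList
  let base := if s.getLast? = some '*' ∨ s.getLast? = some '&' then s.dropLast else s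
  PySem.Set.contains validSet base

-- ===== PRECONDITION & SPEC =====
def Spec_is_valid_class (str : String) (out : Bool) : Prop := out = is_valid_class_alt str
instance (str : String) (out : Bool) : Decidable (Spec_is_valid_class str out) := by unfold Spec_is_valid_class; infer_instance

-- ===== CLAIM (what is proved, stated in full; the proofs are below) =====
def Claim_equal_is_valid_class : Prop := ∀ (str : String), Dom_is_valid_class str → Spec_is_valid_class str (is_valid_class str)

-- ===== LEMMAS AND PROOFS =====

-- the base B parses out of the input
def baseOf (s : List Char) : List Char :=
  if s.getLast? = some '*' ∨ s.getLast? = some '&' then s.dropLast else s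

-- one class name c (not itself ending in '*' or '&') matches one of A's three tests
-- exactly when it equals B's parsed base
lemma match_iff (s c : List Char) (h1 : c.getLast? ≠ some '*') (h2 : c.getLast? ≠ some '&') :
    (c = s ∨ c ++ ['*'] = s ∨ c ++ ['&'] = s) ↔ baseOf s = c := by
  unfold baseOf
  by_cases hl : s.getLast? = some '*' ∨ s.getLast? = some '&'
  · simp only [hl, if_pos]
    constructor
    · rintro (rfl | rfl | rfl)
      · exact absurd hl (by simp [h1, h2])
      · exact List.dropLast_concat
      · exact List.dropLast_concat
    · rintro rfl
      have hne : s ≠ [] := by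
        rcases hl with hx | hx <;> (intro h; simp [h] at hx)
      have hds := List.dropLast_concat_getLast hne
      rcases hl with hx | hx <;>
        rw [List.getLast?_eq_some_getLast hne, Option.some_inj] at hx
      · right; left; rw [← hx]; exact hds
      · right; right; rw [← hx]; exact hds
  · simp only [hl, if_neg, not_false_iff]
    constructor
    · rintro (rfl | rfl | rfl)
      · rfl
      · exact absurd (Or.inl List.getLast?_concat) hl
      · exact absurd (Or.inr List.getLast?_concat) hl
    · rintro rfl; exact Or.inl rfl

-- A's loop over class names equals a membership test of B's parsed base
lemma loop_eq (s : List Char) (cs : List String)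
    (h : ∀ c ∈ cs, c.toList.getLast? ≠ some '*' ∧ c.toList.getLast? ≠ some '&') :
    isValidLoop s cs = cs.any (fun c => c.toList == baseOf s) := by
  induction cs with
  | nil => rfl
  | cons c rest ih =>
    have hc := h c (List.mem_cons_self)
    have hrest : ∀ c ∈ rest, c.toList.getLast? ≠ some '*' ∧ c.toList.getLast? ≠ some '&' :=
      fun x hx => h x (List.mem_cons_of_mem _ hx)
    have hm := match_iff s c.toList hc.1 hc.2
    simp only [isValidLoop, List.any_cons, ih hrest]
    by_cases hb : baseOf s = c.toList
    · have : c.toList = s ∨ c.toList ++ ['*'] = s ∨ c.toList ++ ['&'] = s := hm.mpr hb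
      rcases this with h' | h' | h' <;> simp [h', hb.symm, beq_iff_eq] <;> simp_all
    · have h1 : ¬ c.toList = s := fun h' => hb (hm.mp (Or.inl h'))
      have h2 : ¬ c.toList ++ ['*'] = s := fun h' => hb (hm.mp (Or.inr (Or.inl h')))
      have h3 : ¬ c.toList ++ ['&'] = s := fun h' => hb (hm.mp (Or.inr (Or.inr h')))
      have hb' : ¬ c.toList = baseOf s := fun h' => hb h'.symm
      simp [h1, h2, h3, hb', beq_iff_eq]

-- ===== VERDICT (by name: the statement is the Claim_ definition above) =====
theorem is_valid_class_spec : Claim_equal_is_valid_class := by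
  intro str _
  unfold Spec_is_valid_class is_valid_class is_valid_class_alt
  rw [loop_eq str.toList valid_classes (by decide)]
  show valid_classes.any (fun c => c.toList == baseOf str.toList)
      = PySem.Set.contains validSet (baseOf str.toList)
  generalize baseOf str.toList = b
  have : PySem.Set.contains validSet b = decide (b ∈ valid_classes.map String.toList) := by
    simp [PySem.Set.contains, validSet, PySem.Set.mem_ofList]
  rw [this, Bool.eq_iff_iff]
  simp only [List.any_eq_true, beq_iff_eq, decide_eq_true_eq, List.mem_map]
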